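-- pv_equiv track=rewrite | github.com/cmudrc/MAS-Aviary | src/coordination/blackboard.py | _strip_reasoning
-- ===== SOURCE A (Python) =====
-- def _strip_reasoning(value: str) -> str:
--     """Remove reasoning-indicator patterns from a value string."""
--     lines = value.split("\n")
--     filtered = []
--     skip = False
--     for line in lines:
--         lower = line.lower().strip()
--         # Skip lines that begin with reasoning indicators.
--         if lower.startswith(("reasoning:", "because:", "my reasoning:",
--                             "explanation:", "rationale:", "thinking:")):
--             skip = True
--             continue
--         # Resume after a blank line following a reasoning block.
--         if skip and not lower:
--             skip = False
--             continue
--         if not skip: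
--             filtered.append(line)
--     return "\n".join(filtered)
-- ===== SOURCE B (Python) =====
-- _PREFIXES = ("reasoning:", "because:", "my reasoning:",
--              "explanation:", "rationale:", "thinking:")
--
--
-- def _strip_reasoning(value: str) -> str:
--     """Remove reasoning-indicator patterns from a value string."""
--     lines = value.split("\n")
--     kept = []
--     i = 0
--     n = len(lines)
--     while i < n:
--         if lines[i].lower().strip().startswith(_PREFIXES):
--             # Skip the whole reasoning block: advance past every non-blank
--             # line and consume the terminating blank line (if any).
--             i += 1
--             while i < n and lines[i].lower().strip():
--                 i += 1
--             i += 1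
--         else:
--             kept.append(lines[i])
--             i += 1
--     return "\n".join(kept)
-- ===== Notes on version B (the rewrite author's own statement) =====
-- stated objective: alternative
-- what changed: Replaced A's single-pass boolean skip-flag state machine with an explicit cursor traversal that, on hitting a reasoning-indicator line, runs an inner loop consuming the whole block up to and including its terminating blank line.
import Mathlib
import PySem

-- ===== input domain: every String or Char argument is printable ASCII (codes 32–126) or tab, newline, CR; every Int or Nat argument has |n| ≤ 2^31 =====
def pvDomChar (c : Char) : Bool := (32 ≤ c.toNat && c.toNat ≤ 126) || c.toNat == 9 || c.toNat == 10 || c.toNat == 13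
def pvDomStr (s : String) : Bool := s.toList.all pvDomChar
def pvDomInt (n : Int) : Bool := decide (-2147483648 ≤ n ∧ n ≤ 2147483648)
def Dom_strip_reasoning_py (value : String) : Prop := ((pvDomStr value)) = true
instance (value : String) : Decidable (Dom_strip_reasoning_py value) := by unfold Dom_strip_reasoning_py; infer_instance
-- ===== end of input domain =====

-- B replaces A's boolean skip-flag state machine by an explicit cursor traversal that
-- skips a whole reasoning block (up to and including its terminating blank line) in one
-- inner loop; objective: alternative decomposition, same cost.

-- ===== PORT A =====
def stripPrefixes : List String :=
  ["reasoning:", "because:", "my reasoning:", "explanation:", "rationale:", "thinking:"]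

-- lower.startswith((p1, …, p6))
def stripIndicator (lower : String) : Bool :=
  stripPrefixes.any (fun p => PySem.Str.startswith lower p)

def stripALoop (lines : List String) (filtered : List String) (skip : Bool) : List String :=
  match lines with
  | [] => filtered
  | line :: rest =>
    let lower := PySem.Str.strip (PySem.Str.lower line)
    if stripIndicator lower then
      stripALoop rest filtered true
    else if skip && (lower == "") then
      stripALoop rest filtered false
    else if !skip then
      stripALoop rest (filtered ++ [line]) skip
    else
      stripALoop rest filtered skip

def strip_reasoning_py (value : String) : String :=
  PySem.Str.join "\n" (stripALoop ((PySem.Str.split? value "\n").getD []) [] false)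

-- ===== PORT B =====
-- inner while loop: advance past non-blank lines, consume the terminating blank
def altSkipBlock (lines : List String) : List String :=
  match lines with
  | [] => []
  | l :: rest =>
    if PySem.Str.strip (PySem.Str.lower l) == "" then rest
    else altSkipBlock rest

theorem altSkipBlock_length_le (lines : List String) :
    (altSkipBlock lines).length ≤ lines.length := by
  induction lines with
  | nil => simp [altSkipBlock]
  | cons l rest ih =>
    simp only [altSkipBlock]
    split
    · simp
    · exact Nat.le_succ_of_le ih

def altGo (lines : List String) : List String :=
  match lines with
  | [] => []
  | l :: rest =>
    if stripIndicator (PySem.Str.strip (PySem.Str.lower l)) then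
      altGo (altSkipBlock rest)
    else
      l :: altGo rest
termination_by lines.length
decreasing_by
  · exact Nat.lt_succ_of_le (altSkipBlock_length_le rest)
  · simp

def strip_reasoning_py_alt (value : String) : String :=
  PySem.Str.join "\n" (altGo ((PySem.Str.split? value "\n").getD []))

-- ===== PRECONDITION & SPEC =====
def Spec_strip_reasoning_py (value : String) (out : String) : Prop := out = strip_reasoning_py_alt value
instance (value : String) (out : String) : Decidable (Spec_strip_reasoning_py value out) := by unfold Spec_strip_reasoning_py; infer_instance

-- ===== CLAIM (what is proved, stated in full; the proofs are below) =====
def Claim_equal_strip_reasoning_py : Prop := ∀ (value : String), Dom_strip_reasoning_py value → Spec_strip_reasoning_py value (strip_reasoning_py value)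

-- ===== LEMMAS AND PROOFS =====

-- an indicator line is never blank (every prefix is non-empty)
theorem indicator_ne_blank (lower : String) (h : stripIndicator lower = true) :
    (lower == "") = false := by
  cases hbe : (lower == "") with
  | false => rfl
  | true =>
    exfalso
    have hb : lower = "" := eq_of_beq hbe
    subst hb
    revert h
    decide

theorem stripALoop_eq_altGo (lines : List String) :
    (∀ acc, stripALoop lines acc false = acc ++ altGo lines) ∧
    (∀ acc, stripALoop lines acc true = acc ++ altGo (altSkipBlock lines)) := by
  induction lines with
  | nil => simp [stripALoop, altGo, altSkipBlock]
  | cons l rest ih =>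
    constructor
    · intro acc
      cases hI : stripIndicator (PySem.Str.strip (PySem.Str.lower l)) with
      | true =>
        simp only [stripALoop, altGo, hI, if_true]
        exact ih.2 acc
      | false =>
        simp only [stripALoop, altGo, hI, Bool.false_eq_true, if_false, Bool.false_and,
          Bool.not_false, if_true]
        rw [ih.1 (acc ++ [l])]
        simp
    · intro acc
      cases hI : stripIndicator (PySem.Str.strip (PySem.Str.lower l)) with
      | true =>
        simp only [stripALoop, altSkipBlock, hI, if_true, indicator_ne_blank _ hI,
          Bool.false_eq_true, if_false]
        exact ih.2 acc
      | false =>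
        cases hB : (PySem.Str.strip (PySem.Str.lower l) == "") with
        | true =>
          simp only [stripALoop, altSkipBlock, hI, Bool.false_eq_true, if_false, hB,
            if_true, Bool.true_and]
          exact ih.1 acc
        | false =>
          simp only [stripALoop, altSkipBlock, hI, Bool.false_eq_true, if_false, hB,
            Bool.true_and, Bool.not_true]
          exact ih.2 acc

-- ===== VERDICT (by name: the statement is the Claim_ definition above) =====
theorem strip_reasoning_py_spec : Claim_equal_strip_reasoning_py := by
  intro value _
  unfold Spec_strip_reasoning_py strip_reasoning_py strip_reasoning_py_alt
  rw [(stripALoop_eq_altGo _).1 []]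
  simp
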